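-- pv_equiv track=rewrite | github.com/Lee-HT/Lee_HT-programmers | burst_balloons.py | solution
-- ===== SOURCE A (Python) =====
-- from math import inf
--
-- def leftmin(lista):
--     leftlist = []
--     lmin = inf
--     for i in lista[:-1]:
--         if i < lmin:
--             lmin = i
--         leftlist.append(lmin)
--     leftlist.insert(0,inf)
--     return leftlist
--
-- def rightmin(lista):
--     rightlist = []
--     rmin = inf
--     for i in lista[:0:-1]:
--         if i < rmin:
--             rmin = i
--         rightlist.append(rmin)
--     rightlist.insert(0,inf)
--     return rightlist
--
-- def minmax(num,left,right):
--     if num < max(left,right):       #둘중 하나라도 현재 풍선보다 크면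
--         return 1                    #기회 소모없이 터트릴 수 있음
--     return 0
--
-- def solution(a):
--     answer = 0
--     lena = len(a)
--     leftlist = leftmin(a)        #0~index-1 범위의 최소값 (dp) / index 낮은순 저장
--     rightlist = rightmin(a)      #index+1~lena 범위의 최소값 / index 높은순 저장
--     for i in range(lena):
--         lmin = leftlist[i]
--         rmin = rightlist[-(i+1)]    #right은 역순으로 저장
--         answer += minmax(a[i],lmin,rmin)    #해당 풍선의 양옆 풍선들의 최소값 풍선을 제외하고 기회 소모없이 제거가능
--     return answer
-- ===== SOURCE B (Python) =====
-- def solution(a):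
--     INF = float('inf')
--     return sum(
--         min(a[:i], default=INF) > y or min(a[i + 1:], default=INF) > y
--         for i, y in enumerate(a)
--     )
-- ===== Notes on version B (the rewrite author's own statement) =====
-- stated objective: simpler
-- what changed: B replaces A's two precomputed prefix/suffix-min arrays plus a negative-index recombination loop by a single brute-force comprehension: element i counts iff min(a[:i]) or min(a[i+1:]) (INF for an empty side) exceeds a[i].
import Mathlib
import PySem

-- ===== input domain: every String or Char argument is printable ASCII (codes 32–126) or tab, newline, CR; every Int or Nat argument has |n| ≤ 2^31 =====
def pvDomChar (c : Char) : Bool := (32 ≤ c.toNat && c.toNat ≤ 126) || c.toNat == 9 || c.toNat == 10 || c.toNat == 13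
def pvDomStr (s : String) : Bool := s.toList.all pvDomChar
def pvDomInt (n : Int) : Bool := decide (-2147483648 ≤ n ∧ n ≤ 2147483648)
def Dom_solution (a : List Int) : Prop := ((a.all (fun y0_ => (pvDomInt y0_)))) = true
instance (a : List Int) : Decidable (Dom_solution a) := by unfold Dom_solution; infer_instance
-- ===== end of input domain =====

-- B replaces A's two precomputed prefix/suffix-min arrays and reverse-indexed combine loop
-- by one brute-force comprehension: an element counts iff everything before it, or
-- everything after it, is strictly larger (shorter/plainer; trades A's O(n) for O(n^2)).

-- ===== PORT A =====
-- Python's `inf` sentinel is modelled as `none` (none = +infinity); exact on Int inputs.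
def pvLtO (x : Int) (m : Option Int) : Bool :=
  match m with
  | none => true            -- x < inf
  | some v => decide (x < v)

-- max(left, right) on the inf-extended integers
def pvMaxO : Option Int → Option Int → Option Int
  | none, _ => none
  | _, none => none
  | some x, some y => some (max x y)

def leftmin (lista : List Int) : List (Option Int) :=
  -- for i in lista[:-1]: if i < lmin: lmin = i; leftlist.append(lmin)
  let r := lista.dropLast.foldl
    (fun (p : List (Option Int) × Option Int) i =>
      let lmin := if pvLtO i p.2 then some i else p.2
      (p.1 ++ [lmin], lmin)) ([], none)
  none :: r.1               -- leftlist.insert(0, inf)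

def rightmin (lista : List Int) : List (Option Int) :=
  -- for i in lista[:0:-1]: if i < rmin: rmin = i; rightlist.append(rmin)
  let r := ((lista.drop 1).reverse).foldl
    (fun (p : List (Option Int) × Option Int) i =>
      let rmin := if pvLtO i p.2 then some i else p.2
      (p.1 ++ [rmin], rmin)) ([], none)
  none :: r.1               -- rightlist.insert(0, inf)

def minmax (num : Int) (left right : Option Int) : Int :=
  if pvLtO num (pvMaxO left right) then 1 else 0

-- indices in the loop are always in range, so pyGetD is exact here
def solution (a : List Int) : Int :=
  let lena : Int := a.length
  let leftlist := leftmin a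
  let rightlist := rightmin a
  (PySem.List.pyRange 0 lena 1).foldl
    (fun answer i =>
      let lmin := PySem.List.pyGetD leftlist i none
      let rmin := PySem.List.pyGetD rightlist (-(i + 1)) none
      answer + minmax (PySem.List.pyGetD a i 0) lmin rmin) 0

-- ===== PORT B =====
-- min(slice, default=INF) > y; `none` models the INF default of Python's min
def pvGtO (m : Option Int) (y : Int) : Bool :=
  match m with
  | none => true            -- INF > y
  | some v => decide (v > y)

-- sum( min(a[:i], default=INF) > y or min(a[i+1:], default=INF) > y for i, y in enumerate(a) )
def solution_alt (a : List Int) : Int :=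
  (PySem.List.enumerate a).foldl
    (fun s p =>
      s + (if pvGtO (PySem.List.slice a none (some p.1)).min? p.2 ||
             pvGtO (PySem.List.slice a (some (p.1 + 1)) none).min? p.2
           then 1 else 0)) 0

-- ===== PRECONDITION & SPEC =====
def Spec_solution (a : List Int) (out : Int) : Prop := out = solution_alt a
instance (a : List Int) (out : Int) : Decidable (Spec_solution a out) := by unfold Spec_solution; infer_instance

-- ===== CLAIM (what is proved, stated in full; the proofs are below) =====
def Claim_equal_solution : Prop := ∀ (a : List Int), Dom_solution a → Spec_solution a (solution a)

-- ===== LEMMAS AND PROOFS =====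

-- proof-only helpers: running strict minimum (none = +infinity), prefix/suffix minima
def pvMinUpd (m : Option Int) (x : Int) : Option Int := if pvLtO x m then some x else m

def pvRunMin (m : Option Int) (l : List Int) : Option Int := l.foldl pvMinUpd m

def pvPre (a : List Int) (i : Nat) : Option Int := pvRunMin none (a.take i)

def pvSuf (a : List Int) (i : Nat) : Option Int := pvRunMin none (a.drop (i + 1))

theorem pvRunMin_cons (m : Option Int) (x : Int) (l : List Int) :
    pvRunMin m (x :: l) = pvRunMin (pvMinUpd m x) l := rfl

theorem pvMinUpd_eq (m : Option Int) (x : Int) :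
    pvMinUpd m x = some (min (m.getD x) x) := by
  cases m with
  | none => simp [pvMinUpd, pvLtO]
  | some v =>
      simp only [pvMinUpd, pvLtO, Option.getD_some]
      split_ifs with h
      · simp_all
        omega
      · simp_all

theorem pvMinUpd_comm (m : Option Int) (x y : Int) :
    pvMinUpd (pvMinUpd m x) y = pvMinUpd (pvMinUpd m y) x := by
  rcases m with _ | v <;> (simp [pvMinUpd_eq]; omega)

theorem pvRunMin_minUpd (m : Option Int) (x : Int) (l : List Int) :
    pvRunMin (pvMinUpd m x) l = pvMinUpd (pvRunMin m l) x := by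
  induction l generalizing m with
  | nil => rfl
  | cons y t ih => rw [pvRunMin_cons, pvMinUpd_comm, ih, ← pvRunMin_cons]

theorem pvRunMin_reverse (m : Option Int) (l : List Int) :
    pvRunMin m l.reverse = pvRunMin m l := by
  induction l generalizing m with
  | nil => rfl
  | cons x t ih =>
      have h1 : pvRunMin m ((x :: t).reverse) = pvMinUpd (pvRunMin m t.reverse) x := by
        simp [pvRunMin, List.foldl_append]
      rw [h1, ih, ← pvRunMin_minUpd, ← pvRunMin_cons]

-- the shared min-array accumulation loop of leftmin/rightmin
theorem pvFoldMins (l : List Int) (acc : List (Option Int)) (m : Option Int) :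
    l.foldl (fun (p : List (Option Int) × Option Int) i =>
        let lmin := if pvLtO i p.2 then some i else p.2
        (p.1 ++ [lmin], lmin)) (acc, m)
      = (acc ++ (List.range l.length).map (fun j => pvRunMin m (l.take (j + 1))),
         pvRunMin m l) := by
  induction l generalizing acc m with
  | nil => simp [pvRunMin]
  | cons x t ih =>
      rw [List.foldl_cons]
      show t.foldl _ (acc ++ [pvMinUpd m x], pvMinUpd m x) = _
      rw [ih]
      simp only [Prod.mk.injEq]
      refine ⟨?_, rfl⟩
      rw [List.length_cons, List.range_succ_eq_map, List.map_cons, List.map_map,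
        List.append_assoc]
      rfl

theorem leftmin_eq (a : List Int) :
    leftmin a = none :: (List.range a.dropLast.length).map
      (fun j => pvRunMin none (a.dropLast.take (j + 1))) := by
  unfold leftmin
  simp only [pvFoldMins, List.nil_append]

theorem rightmin_eq (a : List Int) :
    rightmin a = none :: (List.range (a.drop 1).reverse.length).map
      (fun j => pvRunMin none ((a.drop 1).reverse.take (j + 1))) := by
  unfold rightmin
  simp only [pvFoldMins, List.nil_append]

theorem rightmin_length (a : List Int) : (rightmin a).length = (a.length - 1) + 1 := by
  rw [rightmin_eq]; simp

theorem leftmin_getD (a : List Int) (i : Nat) (h : i < a.length) :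
    (leftmin a).getD i none = pvPre a i := by
  rw [leftmin_eq]
  cases i with
  | zero => rfl
  | succ j =>
      rw [List.getD_cons_succ]
      have hj : j < (List.range a.dropLast.length).length := by
        simp [List.length_dropLast]; omega
      rw [List.getD_eq_getElem _ _ (by simpa using hj), List.getElem_map, List.getElem_range]
      unfold pvPre
      congr 1
      rw [List.dropLast_eq_take, List.take_take]
      congr 1
      omega

theorem rightmin_getD (a : List Int) (i : Nat) (h : i < a.length) :
    (rightmin a).getD (a.length - 1 - i) none = pvSuf a i := by
  rw [rightmin_eq]
  by_cases hi : a.length - 1 - i = 0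
  · have hsuf : pvSuf a i = (none : Option Int) := by
      unfold pvSuf
      rw [List.drop_eq_nil_of_le (show a.length ≤ i + 1 by omega)]
      rfl
    rw [hi, hsuf]
    rfl
  · have hidx : a.length - 1 - i = (a.length - 2 - i) + 1 := by omega
    rw [hidx, List.getD_cons_succ]
    have hj : a.length - 2 - i < (List.range (a.drop 1).reverse.length).length := by
      simp; omega
    rw [List.getD_eq_getElem _ _ (by simpa using hj), List.getElem_map, List.getElem_range]
    have htake : (a.drop 1).reverse.take ((a.length - 2 - i) + 1) = (a.drop (i + 1)).reverse := by
      rw [List.take_reverse, List.drop_drop]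
      congr 2
      simp
      omega
    rw [htake, pvRunMin_reverse]
    rfl

theorem pvLtO_maxO (x : Int) (l r : Option Int) :
    pvLtO x (pvMaxO l r) = (pvLtO x l || pvLtO x r) := by
  cases l <;> cases r <;>
    simp [pvLtO, pvMaxO]

-- the running strict minimum of a whole list is its minimum
theorem pvRunMin_some (v : Int) (l : List Int) :
    pvRunMin (some v) l = some (l.foldl min v) := by
  induction l generalizing v with
  | nil => rfl
  | cons x t ih =>
      rw [pvRunMin_cons, pvMinUpd_eq, Option.getD_some, ih, List.foldl_cons]

theorem pvRunMin_eq_min? (l : List Int) : pvRunMin none l = l.min? := by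
  cases l with
  | nil => rfl
  | cons x t =>
      rw [pvRunMin_cons, show pvMinUpd none x = some x from rfl, pvRunMin_some,
        List.min?_cons']

theorem pvGtO_min? (l : List Int) (y : Int) : pvGtO l.min? y = pvLtO y (pvRunMin none l) := by
  rw [pvRunMin_eq_min?]
  cases l.min? <;> rfl

-- A computed index-wise
theorem solution_eq_sum (a : List Int) :
    solution a = ((List.range a.length).map (fun k =>
        if pvLtO (a.getD k 0) (pvPre a k) || pvLtO (a.getD k 0) (pvSuf a k)
        then (1 : Int) else 0)).sum := by
  simp only [solution]
  rw [PySem.List.pyRange_zero_nat, List.foldl_map, PySem.List.foldl_add, zero_add]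
  congr 1
  apply List.map_congr_left
  intro k hk
  have hkn : k < a.length := List.mem_range.mp hk
  have h1 : PySem.List.pyGetD a (k : Int) 0 = a.getD k 0 := PySem.List.pyGetD_natCast a k 0
  have h2 : PySem.List.pyGetD (leftmin a) (k : Int) none = pvPre a k := by
    rw [PySem.List.pyGetD_natCast, leftmin_getD a k hkn]
  have h3 : PySem.List.pyGetD (rightmin a) (-((k : Int) + 1)) none = pvSuf a k := by
    have hc : (-((k : Int) + 1)) = -(((k + 1 : Nat) : Int)) := by push_cast; ring
    have hle : k + 1 ≤ (rightmin a).length := by rw [rightmin_length]; omega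
    rw [hc, PySem.List.pyGetD_neg_natCast (rightmin a) (k + 1) none (by omega) hle]
    have hlt : (rightmin a).length - (k + 1) < (rightmin a).length := by
      rw [rightmin_length]; omega
    rw [← List.getD_eq_getElem (rightmin a) none hlt]
    have hidx : (rightmin a).length - (k + 1) = a.length - 1 - k := by
      rw [rightmin_length]; omega
    rw [hidx, rightmin_getD a k hkn]
  rw [h1, h2, h3]
  unfold minmax
  rw [pvLtO_maxO]

-- B computed index-wise
theorem solution_alt_eq_sum (a : List Int) :
    solution_alt a = ((List.range a.length).map (fun k =>
        if pvLtO (a.getD k 0) (pvPre a k) || pvLtO (a.getD k 0) (pvSuf a k)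
        then (1 : Int) else 0)).sum := by
  simp only [solution_alt]
  rw [PySem.List.enumerate_eq_map_pyRange a 0, List.foldl_map]
  simp only [PySem.List.len]
  rw [PySem.List.pyRange_zero_nat, List.foldl_map, PySem.List.foldl_add, zero_add]
  congr 1
  apply List.map_congr_left
  intro k hk
  have hkn : k < a.length := List.mem_range.mp hk
  have hy : PySem.List.pyGetD a (k : Int) 0 = a.getD k 0 := PySem.List.pyGetD_natCast a k 0
  have hsl1 : PySem.List.slice a none (some (k : Int)) = a.take k :=
    PySem.List.slice_to_natCast a k
  have hsl2 : PySem.List.slice a (some ((k : Int) + 1)) none = a.drop (k + 1) := by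
    have : ((k : Int) + 1) = ((k + 1 : Nat) : Int) := by push_cast; ring
    rw [this, PySem.List.slice_from_natCast]
  simp only [hy, hsl1, hsl2, pvGtO_min?]
  rfl
-- ===== VERDICT =====
theorem solution_spec : Claim_equal_solution := by
  intro a _
  unfold Spec_solution
  rw [solution_eq_sum, solution_alt_eq_sum]
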